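-- pv_equiv track=rewrite | github.com/tie/nixpkgs | pkgs/tools/nix/nixos-config-flake-uri/src/nixos_config_flake_uri/flakeuri.py | parse_attr_path
-- ===== SOURCE A (Python) =====
-- import dataclasses
--
-- @dataclasses.dataclass(frozen=True)
-- class MissingClosingQuote(Exception):
--     attr_path: str
--
-- def parse_attr_path(selector: str, prefix: list[str] = []) -> list[str]:
--     """Parses attribute path from URI fragment attribute selector.
--
--     :param selector: Attribute selector from flake URI.
--     :param prefix: Attribute path prefix for relative selectors.
--     :raises MissingClosingQuote: If the selector contains unbalanced quotes.
--     """
--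
--     s = selector
--
--     absolute = s.startswith(".")
--     if absolute:
--         s = s[1:]
--
--     attr_path = list(prefix) if not absolute else []
--     current = ""
--     while len(s) > 0:
--         try:
--             i, c = next((i, c) for i, c in enumerate(s) if c in [".", "\""])
--         except StopIteration:
--             attr_path.append(current + s)
--             current = ""
--             break
--         current += s[:i]
--         s = s[i+1:]
--         match c:
--             case "\"":
--                 index = s.find("\"")
--                 if index == -1:
--                     raise MissingClosingQuote(selector)
--                 current += s[:index]
--                 s = s[index+1:]
--             # Nix ignores trailing dot, e.g. "nixpkgs#hello." is identical to
--             # "nixpkgs#hello". We do the same, that is, loop stops if we are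
--             # at the end of the string.
--             case ".":
--                 attr_path.append(current)
--                 current = ""
--     if current != "":
--         attr_path.append(current)
--     return attr_path
-- ===== SOURCE B (Python) =====
-- import dataclasses
--
-- @dataclasses.dataclass(frozen=True)
-- class MissingClosingQuote(Exception):
--     attr_path: str
--
-- def parse_attr_path(selector: str, prefix: list[str] = []) -> list[str]:
--     """Single-pass state-machine scan: one cursor over the characters,
--     no slicing or re-enumeration of the remainder."""
--     absolute = selector.startswith(".")
--     attr_path = [] if absolute else list(prefix)
--     current = ""
--     quoted = False
--     for c in (selector[1:] if absolute else selector):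
--         if quoted:
--             if c == '"':
--                 quoted = False
--             else:
--                 current += c
--         elif c == '"':
--             quoted = True
--         elif c == '.':
--             attr_path.append(current)
--             current = ""
--         else:
--             current += c
--     if quoted:
--         raise MissingClosingQuote(selector)
--     if current != "":
--         attr_path.append(current)
--     return attr_path
-- ===== Notes on version B (the rewrite author's own statement) =====
-- stated objective: faster
-- what changed: Replaced A's repeated slice-and-re-enumerate loop (find next delimiter, slice the remainder, restart) by a single-pass character state machine with a quoted flag and one cursor.
-- outside the precondition, e.g. on parse_attr_path('"', []): A raises MissingClosingQuote, B raises MissingClosingQuote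
import Mathlib
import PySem

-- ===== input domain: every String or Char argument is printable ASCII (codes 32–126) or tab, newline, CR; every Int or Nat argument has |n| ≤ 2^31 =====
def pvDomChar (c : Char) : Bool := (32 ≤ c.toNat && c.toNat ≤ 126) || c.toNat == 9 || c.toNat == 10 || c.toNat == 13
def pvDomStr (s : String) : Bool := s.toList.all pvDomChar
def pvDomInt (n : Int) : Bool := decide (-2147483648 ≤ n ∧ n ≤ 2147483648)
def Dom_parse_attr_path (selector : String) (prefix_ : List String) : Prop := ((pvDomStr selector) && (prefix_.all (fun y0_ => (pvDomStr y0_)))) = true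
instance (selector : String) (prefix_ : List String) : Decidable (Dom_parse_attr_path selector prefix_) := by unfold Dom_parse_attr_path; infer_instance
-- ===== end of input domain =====

-- B replaces A's slice-and-re-enumerate loop by a single-pass character state
-- machine (one cursor, a `quoted` flag); return values agree wherever A returns
-- (Pre_: balanced quotes), and where A raises MissingClosingQuote B raises too.

-- ===== PORT A =====
-- `next((i, c) for i, c in enumerate(s) if c in [".", "\""])`: first index and char that is '.' or '"'
def pvFindDotQuote : List Char → Option (Nat × Char)
  | [] => none
  | c :: rest =>
      if c = '.' ∨ c = '"' then some (0, c)
      else match pvFindDotQuote rest with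
           | some (i, d) => some (i + 1, d)
           | none => none

-- `s.find('"')` (only its ≥0 / -1 distinction is used, so as an Option)
def pvFindQuote : List Char → Option Nat
  | [] => none
  | c :: rest =>
      if c = '"' then some 0
      else match pvFindQuote rest with
           | some i => some (i + 1)
           | none => none

-- needed by pvA_loop's termination proof, hence stated before it
theorem pvFindDotQuote_lt {s : List Char} {i : Nat} {c : Char}
    (h : pvFindDotQuote s = some (i, c)) : i < s.length := by
  induction s generalizing i c with
  | nil => simp [pvFindDotQuote] at h
  | cons a t ih =>
      rw [pvFindDotQuote] at h
      split at h
      · simp at h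
        simp [← h.1]
      · cases hf : pvFindDotQuote t with
        | none => rw [hf] at h; simp at h
        | some p =>
            obtain ⟨j, d⟩ := p
            rw [hf] at h
            simp at h
            have := ih hf
            simp only [List.length_cons]
            omega

theorem pvFindQuote_lt {s : List Char} {j : Nat}
    (h : pvFindQuote s = some j) : j < s.length := by
  induction s generalizing j with
  | nil => simp [pvFindQuote] at h
  | cons a t ih =>
      rw [pvFindQuote] at h
      split at h
      · simp at h
        simp [← h]
      · cases hf : pvFindQuote t with
        | none => rw [hf] at h; simp at h
        | some k =>
            rw [hf] at h
            simp at h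
            have := ih hf
            simp only [List.length_cons]
            omega

-- the `while len(s) > 0` loop of A; `none` = `raise MissingClosingQuote`;
-- the trailing `if current != "": append` is folded into the `s = []` exit
-- (on the StopIteration break, current is set to "" so nothing more is appended)
def pvA_loop (s : List Char) (ap : List String) (cur : List Char) : Option (List String) :=
  match s with
  | [] => some (if cur ≠ [] then ap ++ [String.ofList cur] else ap)
  | a :: t =>
    match hf : pvFindDotQuote (a :: t) with
    | none =>
        -- StopIteration: attr_path.append(current + s); break
        some (ap ++ [String.ofList (cur ++ (a :: t))])
    | some (i, c) =>
        -- current += s[:i]; s = s[i+1:]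
        let cur' := cur ++ (a :: t).take i
        let s' := (a :: t).drop (i + 1)
        if c = '"' then
          match hq : pvFindQuote s' with
          | none => none     -- raise MissingClosingQuote(selector)
          | some j => pvA_loop (s'.drop (j + 1)) ap (cur' ++ s'.take j)
        else
          pvA_loop s' (ap ++ [String.ofList cur']) []
termination_by s.length
decreasing_by
  · have hi := pvFindDotQuote_lt hf
    have hj := pvFindQuote_lt hq
    simp only [s', List.length_drop, List.length_cons] at *
    omega
  · have hi := pvFindDotQuote_lt hf
    simp only [s', List.length_drop, List.length_cons] at *
    omega

def parse_attr_path (selector : String) (prefix_ : List String) : List String :=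
  -- `absolute = s.startswith(".")`; `s[1:]` = drop 1 on the char list (exact)
  let absolute := PySem.Str.startswith selector "."
  let s := if absolute then selector.toList.drop 1 else selector.toList
  let ap := if absolute then [] else prefix_   -- `list(prefix) if not absolute else []`
  (pvA_loop s ap []).getD []   -- unreachable default: Pre_ excludes the raising inputs

-- ===== PORT B =====
-- one step of the state machine; state = (attr_path, current, quoted)
def pvB_step (st : List String × List Char × Bool) (c : Char) : List String × List Char × Bool :=
  match st with
  | (ap, cur, quoted) =>
      if quoted then
        if c = '"' then (ap, cur, false) else (ap, cur ++ [c], true)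
      else if c = '"' then (ap, cur, true)
      else if c = '.' then (ap ++ [String.ofList cur], [], false)
      else (ap, cur ++ [c], false)

-- after the loop: `if quoted: raise`, else append a nonempty current
def pvB_finish (st : List String × List Char × Bool) : Option (List String) :=
  match st with
  | (_, _, true) => none
  | (ap, cur, false) => some (if cur ≠ [] then ap ++ [String.ofList cur] else ap)

def parse_attr_path_alt (selector : String) (prefix_ : List String) : List String :=
  let absolute := PySem.Str.startswith selector "."
  let body := if absolute then selector.toList.drop 1 else selector.toList
  let init : List String × List Char × Bool := ((if absolute then [] else prefix_), [], false)
  (pvB_finish (body.foldl pvB_step init)).getD []   -- unreachable default: Pre_ excludes the raising inputs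

-- ===== PRECONDITION & SPEC =====
-- A raises MissingClosingQuote exactly when the selector contains an odd number
-- of '"' characters; Pre_ admits every input on which A returns normally.
def Pre_parse_attr_path (selector : String) (prefix_ : List String) : Prop :=
  (selector.toList.count '"') % 2 = 0
instance (selector : String) (prefix_ : List String) : Decidable (Pre_parse_attr_path selector prefix_) := by unfold Pre_parse_attr_path; infer_instance

def pvWitness_parse_attr_path : String × List String := ("pkgs.\"x.y\".z", ["p"])

def Spec_parse_attr_path (selector : String) (prefix_ : List String) (out : List String) : Prop := out = parse_attr_path_alt selector prefix_
instance (selector : String) (prefix_ : List String) (out : List String) : Decidable (Spec_parse_attr_path selector prefix_ out) := by unfold Spec_parse_attr_path; infer_instance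

-- ===== CLAIM (what is proved, stated in full; the proofs are below) =====
def Claim_equal_parse_attr_path : Prop := ∀ (selector : String) (prefix_ : List String), Dom_parse_attr_path selector prefix_ → Pre_parse_attr_path selector prefix_ → Spec_parse_attr_path selector prefix_ (parse_attr_path selector prefix_)

-- ===== LEMMAS AND PROOFS =====

theorem pvFindDotQuote_none {s : List Char} (h : pvFindDotQuote s = none) :
    ∀ c ∈ s, ¬(c = '.' ∨ c = '"') := by
  induction s with
  | nil => simp
  | cons a t ih =>
      rw [pvFindDotQuote] at h
      split at h
      · simp at h
      · rename_i hdq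
        intro c hc
        rw [List.mem_cons] at hc
        rcases hc with hc | hc
        · subst hc; exact hdq
        · cases hf : pvFindDotQuote t with
          | none => exact ih hf c hc
          | some p => obtain ⟨i, d⟩ := p; rw [hf] at h; simp at h

theorem pvFindDotQuote_some {s : List Char} {i : Nat} {c : Char}
    (h : pvFindDotQuote s = some (i, c)) :
    s = s.take i ++ c :: s.drop (i + 1) ∧
    (∀ d ∈ s.take i, ¬(d = '.' ∨ d = '"')) ∧ (c = '.' ∨ c = '"') := by
  induction s generalizing i c with
  | nil => simp [pvFindDotQuote] at h
  | cons a t ih =>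
      rw [pvFindDotQuote] at h
      split at h
      · rename_i hdq
        simp at h
        obtain ⟨hi, hc⟩ := h
        subst hc
        simp [← hi, hdq]
      · rename_i hdq
        cases hf : pvFindDotQuote t with
        | none => rw [hf] at h; simp at h
        | some p =>
            obtain ⟨j, d⟩ := p
            rw [hf] at h
            simp at h
            obtain ⟨hi, hd⟩ := h
            subst hd
            obtain ⟨h1, h2, h3⟩ := ih hf
            refine ⟨?_, ?_, h3⟩
            · rw [← hi]
              simpa using h1
            · rw [← hi]
              intro d hd
              simp at hd
              rcases hd with hd | hd
              · subst hd; exact hdq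
              · exact h2 d hd

theorem pvFindQuote_none {s : List Char} (h : pvFindQuote s = none) :
    ∀ c ∈ s, c ≠ '"' := by
  induction s with
  | nil => simp
  | cons a t ih =>
      rw [pvFindQuote] at h
      split at h
      · simp at h
      · rename_i hq
        intro c hc
        rw [List.mem_cons] at hc
        rcases hc with hc | hc
        · subst hc; exact hq
        · cases hf : pvFindQuote t with
          | none => exact ih hf c hc
          | some k => rw [hf] at h; simp at h

theorem pvFindQuote_some {s : List Char} {j : Nat}
    (h : pvFindQuote s = some j) :
    s = s.take j ++ '"' :: s.drop (j + 1) ∧ (∀ d ∈ s.take j, d ≠ '"') := by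
  induction s generalizing j with
  | nil => simp [pvFindQuote] at h
  | cons a t ih =>
      rw [pvFindQuote] at h
      split at h
      · rename_i hq
        simp at h
        subst hq
        simp [← h]
      · rename_i hq
        cases hf : pvFindQuote t with
        | none => rw [hf] at h; simp at h
        | some k =>
            rw [hf] at h
            simp at h
            obtain ⟨h1, h2⟩ := ih hf
            refine ⟨?_, ?_⟩
            · rw [← h]; simpa using h1
            · rw [← h]
              intro d hd
              simp at hd
              rcases hd with hd | hd
              · subst hd; exact hq
              · exact h2 d hd

-- B's fold over characters that are neither '.' nor '"', in unquoted state
theorem pvB_fold_plain (t : List Char) (ap : List String) (cur : List Char)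
    (hp : ∀ c ∈ t, ¬(c = '.' ∨ c = '"')) :
    t.foldl pvB_step (ap, cur, false) = (ap, cur ++ t, false) := by
  induction t generalizing cur with
  | nil => simp
  | cons a r ih =>
      have ha := hp a (by simp)
      rw [not_or] at ha
      simp only [List.foldl_cons, pvB_step, if_neg ha.2, if_neg ha.1,
        Bool.false_eq_true, if_false]
      rw [ih (cur ++ [a]) (fun c hc => hp c (by simp [hc]))]
      simp

-- B's fold over characters other than '"', in quoted state
theorem pvB_fold_quoted (t : List Char) (ap : List String) (cur : List Char)
    (hq : ∀ c ∈ t, c ≠ '"') :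
    t.foldl pvB_step (ap, cur, true) = (ap, cur ++ t, true) := by
  induction t generalizing cur with
  | nil => simp
  | cons a r ih =>
      have ha := hq a (by simp)
      simp only [List.foldl_cons, pvB_step, if_neg ha, if_true]
      rw [ih (cur ++ [a]) (fun c hc => hq c (by simp [hc]))]
      simp

-- main correspondence: A's loop equals B's fold + finish, raising included
theorem pvA_loop_eq (s : List Char) (ap : List String) (cur : List Char) :
    pvA_loop s ap cur = pvB_finish (s.foldl pvB_step (ap, cur, false)) := by
  induction hn : s.length using Nat.strong_induction_on generalizing s ap cur with
  | _ n ih =>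
  cases s with
  | nil => simp [pvA_loop, pvB_finish]
  | cons a t =>
    rw [pvA_loop]
    cases hf : pvFindDotQuote (a :: t) with
    | none =>
        have hp := pvFindDotQuote_none hf
        rw [pvB_fold_plain _ _ _ hp]
        simp [pvB_finish]
    | some p =>
        obtain ⟨i, c⟩ := p
        obtain ⟨hsplit, hplain, hdq⟩ := pvFindDotQuote_some hf
        have hlen : i < (a :: t).length := pvFindDotQuote_lt hf
        conv_rhs => rw [hsplit]
        rw [List.foldl_append, pvB_fold_plain _ _ _ hplain, List.foldl_cons]
        by_cases hc : c = '"'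
        · -- quote case
          subst hc
          simp only [if_pos rfl, pvB_step, if_true]
          cases hq : pvFindQuote ((a :: t).drop (i + 1)) with
          | none =>
              have hnq := pvFindQuote_none hq
              simp only [Bool.false_eq_true, if_false, if_pos rfl]
              rw [pvB_fold_quoted _ _ _ hnq]
              simp [pvB_finish]
          | some j =>
              obtain ⟨hsp2, hnq2⟩ := pvFindQuote_some hq
              have hj : j < ((a :: t).drop (i + 1)).length := pvFindQuote_lt hq
              simp only [Bool.false_eq_true, if_false, if_pos rfl]
              conv_rhs => rw [hsp2]
              rw [List.foldl_append, pvB_fold_quoted _ _ _ hnq2, List.foldl_cons]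
              simp only [pvB_step, if_pos rfl, if_true]
              rw [ih (((a :: t).drop (i + 1)).drop (j + 1)).length
                    (by simp only [List.length_drop, List.length_cons] at *; omega)
                    _ _ _ rfl]
        · -- dot case: c = '.' since c ∈ {'.', '"'}
          have hcd : c = '.' := by
            rcases hdq with h | h
            · exact h
            · exact absurd h hc
          subst hcd
          simp only [if_neg hc, pvB_step]
          norm_num
          rw [ih (t.drop i).length
                (by simp only [List.length_drop, List.length_cons] at *; omega)
                _ _ _ rfl]

-- ===== VERDICT (by name: the statement is the Claim_ definition above) =====
theorem parse_attr_path_spec : Claim_equal_parse_attr_path := by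
  intro selector prefix_ _ _
  unfold Spec_parse_attr_path parse_attr_path parse_attr_path_alt
  by_cases h : PySem.Str.startswith selector "." = true
  · simp only [h, if_true, pvA_loop_eq]
  · rw [Bool.not_eq_true] at h
    simp only [h, Bool.false_eq_true, if_false, pvA_loop_eq]
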